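-- pv_equiv track=rewrite | github.com/illteteka/Memestone | python-downloader.py | get_title
-- ===== SOURCE A (Python) =====
-- def get_title(str):
-- 	i = 0
-- 	word = ""
-- 	for i in range(len(str)):
-- 		j = ord(str[i])
-- 		num = ((j >= 32) and (j <= 122))
-- 		exc = ((j != 44) and (j != 34) and (j != 39))
-- 		if (num and exc):
-- 			word = word + str[i]
-- 	return word
-- ===== SOURCE B (Python) =====
-- import re
--
-- _DROP = re.compile(r'[^\x20-\x7a]|["\',]')
--
-- def get_title(str):
--     return _DROP.sub('', str)
-- ===== Notes on version B (the rewrite author's own statement) =====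
-- stated objective: faster
-- what changed: Replaces the index loop with per-character ord tests and quadratic string concatenation by a single precompiled regex deletion: the class [^\x20-\x7a] drops everything outside ord 32..122 and the alternation ["',] drops the three in-range exclusions.
import Mathlib
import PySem

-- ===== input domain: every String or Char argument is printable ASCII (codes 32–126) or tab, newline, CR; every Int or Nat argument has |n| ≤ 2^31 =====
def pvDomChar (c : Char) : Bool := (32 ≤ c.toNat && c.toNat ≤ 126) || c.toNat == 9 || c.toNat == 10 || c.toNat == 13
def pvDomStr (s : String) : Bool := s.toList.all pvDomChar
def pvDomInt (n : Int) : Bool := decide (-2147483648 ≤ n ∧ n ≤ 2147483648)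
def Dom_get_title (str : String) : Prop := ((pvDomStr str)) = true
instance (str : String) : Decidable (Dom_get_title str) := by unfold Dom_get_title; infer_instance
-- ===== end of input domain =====

-- B replaces A's index loop with per-character ord tests by a single regex deletion (ported as a character filter); objective: idiomatic.


-- ===== PORT A =====
-- loop over the characters, appending each char whose code passes the range and exclusion tests
def get_title (str : String) : String :=
  String.ofList (str.toList.foldl (fun word c =>
    let j := c.toNat
    let num := decide (32 ≤ j) && decide (j ≤ 122)
    let exc := decide (j ≠ 44) && decide (j ≠ 34) && decide (j ≠ 39)
    if num && exc then word ++ [c] else word) [])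

-- ===== PORT B =====
-- re.sub(r'[^\x20-\x7a]|["\',]', '', str): deletion by a regex whose language is a set of single
-- characters, ported exactly as a filter keeping the complement of that set
def pvKeep (c : Char) : Bool :=
  (32 ≤ c.toNat && c.toNat ≤ 122) && !(c == '"' || c == '\'' || c == ',')

def get_title_alt (str : String) : String :=
  String.ofList (str.toList.filter pvKeep)

-- ===== PRECONDITION & SPEC =====
def Spec_get_title (str : String) (out : String) : Prop := out = get_title_alt str
instance (str : String) (out : String) : Decidable (Spec_get_title str out) := by unfold Spec_get_title; infer_instance

-- ===== CLAIM (what is proved, stated in full; the proofs are below) =====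
def Claim_equal_get_title : Prop := ∀ (str : String), Dom_get_title str → Spec_get_title str (get_title str)

-- ===== LEMMAS AND PROOFS =====

theorem pred_eq (c : Char) :
    ((decide (32 ≤ c.toNat) && decide (c.toNat ≤ 122)) &&
      (decide (c.toNat ≠ 44) && decide (c.toNat ≠ 34) && decide (c.toNat ≠ 39))) = pvKeep c := by
  have h34 : c.toNat = 34 ↔ c = '"' := by
    rw [show (34:Nat) = Char.toNat '"' from rfl]; exact eq_iff_eq_of_cmp_eq_cmp rfl
  have h39 : c.toNat = 39 ↔ c = '\'' := by
    rw [show (39:Nat) = Char.toNat '\'' from rfl]; exact eq_iff_eq_of_cmp_eq_cmp rfl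
  have h44 : c.toNat = 44 ↔ c = ',' := by
    rw [show (44:Nat) = Char.toNat ',' from rfl]; exact eq_iff_eq_of_cmp_eq_cmp rfl
  simp only [pvKeep]
  by_cases h1 : 32 ≤ c.toNat <;> by_cases h2 : c.toNat ≤ 122 <;>
    by_cases h3 : c.toNat = 44 <;> by_cases h4 : c.toNat = 34 <;> by_cases h5 : c.toNat = 39 <;>
      simp [h1, h2, h3, h4, h5, ← h34, ← h39, ← h44]

-- ===== VERDICT (by name: the statement is the Claim_ definition above) =====
theorem get_title_spec : Claim_equal_get_title := by
  intro str _
  unfold Spec_get_title get_title get_title_alt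
  simp only []
  rw [show (fun (word : List Char) c =>
        let j := c.toNat
        let num := decide (32 ≤ j) && decide (j ≤ 122)
        let exc := decide (j ≠ 44) && decide (j ≠ 34) && decide (j ≠ 39)
        if num && exc then word ++ [c] else word)
      = (fun word c => if pvKeep c then word ++ [c] else word) from by
        funext word c; simp only [← pred_eq c]]
  rw [PySem.List.foldl_append_if_eq_filter]
  simp
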